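-- pv_equiv track=rewrite | github.com/valusun/Compe_Programming | AtCoder/ABC/ABC227/B.py | ExistArea
-- ===== SOURCE A (Python) =====
-- def ExistArea(area):
--     for a in range(1, 200):
--         for b in range(1, 200):
--             if 4 * a * b + 3 * a + 3 * b == area:
--                 return True
--             if 4 * a * b + 3 * a + 3 * b > area:
--                 break
--     return False
-- ===== SOURCE B (Python) =====
-- def ExistArea(area):
--     # For each a, solve (4a+3)*b = area - 3a directly; no inner loop.
--     return any((area - 3 * a) % (4 * a + 3) == 0
--                and 1 <= (area - 3 * a) // (4 * a + 3) <= 199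
--                for a in range(1, 200))
-- ===== Notes on version B (the rewrite author's own statement) =====
-- stated objective: faster
-- what changed: The inner loop over b is removed: for each a, b is solved directly from (4a+3)*b = area-3a by a divisibility and range check.
import Mathlib
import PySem

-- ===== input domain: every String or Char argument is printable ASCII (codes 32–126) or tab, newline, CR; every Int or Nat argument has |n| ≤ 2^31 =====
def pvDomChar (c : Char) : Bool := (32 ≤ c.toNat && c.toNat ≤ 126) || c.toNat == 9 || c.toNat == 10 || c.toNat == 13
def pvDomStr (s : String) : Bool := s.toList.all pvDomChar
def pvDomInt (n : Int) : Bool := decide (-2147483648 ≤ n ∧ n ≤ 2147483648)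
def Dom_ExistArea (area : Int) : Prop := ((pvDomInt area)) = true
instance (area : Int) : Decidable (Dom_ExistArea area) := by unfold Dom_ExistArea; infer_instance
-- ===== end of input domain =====

-- B removes A's inner loop over b: for each a it solves (4a+3)*b = area-3a by a
-- divisibility-and-range check; return values agree on all Int inputs.

-- ===== PORT A =====
-- inner 'for b in range(1, 200)' with early return True and break
def innerA (area a : Int) : List Int → Bool
  | [] => false
  | b :: bs =>
    if 4 * a * b + 3 * a + 3 * b = area then true
    else if 4 * a * b + 3 * a + 3 * b > area then false
    else innerA area a bs

-- outer 'for a in range(1, 200)'; return True propagates, else fall through to False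
def outerA (area : Int) : List Int → Bool
  | [] => false
  | a :: as => if innerA area a (PySem.List.pyRange 1 200 1) then true else outerA area as

def ExistArea (area : Int) : Bool := outerA area (PySem.List.pyRange 1 200 1)

-- ===== PORT B =====
def ExistArea_alt (area : Int) : Bool :=
  (PySem.List.pyRange 1 200 1).any (fun a =>
    decide (PySem.Int.mod (area - 3 * a) (4 * a + 3) = 0 ∧
      1 ≤ PySem.Int.floordiv (area - 3 * a) (4 * a + 3) ∧
      PySem.Int.floordiv (area - 3 * a) (4 * a + 3) ≤ 199))

-- ===== PRECONDITION & SPEC =====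
def Spec_ExistArea (area : Int) (out : Bool) : Prop := out = ExistArea_alt area
instance (area : Int) (out : Bool) : Decidable (Spec_ExistArea area out) := by unfold Spec_ExistArea; infer_instance

-- ===== CLAIM (what is proved, stated in full; the proofs are below) =====
def Claim_equal_ExistArea : Prop := ∀ (area : Int), Dom_ExistArea area → Spec_ExistArea area (ExistArea area)

-- ===== LEMMAS AND PROOFS =====

-- pointwise congruence for Bool.any over the same list
theorem pv_any_congr {α : Type} (l : List α) {p q : α → Bool}
    (h : ∀ x ∈ l, p x = q x) : l.any p = l.any q := by
  induction l with
  | nil => rfl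
  | cons x xs ih =>
    simp only [List.any_cons, h x (List.mem_cons_self ..),
      ih (fun y hy => h y (List.mem_cons_of_mem _ hy))]

-- A's inner break is sound: on a ≤-sorted b-list with a ≥ 1, the break skips only
-- values strictly above area, so the inner loop is just an 'any' over the list.
theorem innerA_eq_any (area a : Int) (ha : 1 ≤ a) :
    ∀ bs : List Int, bs.Pairwise (· ≤ ·) →
      innerA area a bs = bs.any (fun b => decide (4 * a * b + 3 * a + 3 * b = area)) := by
  intro bs hbs
  induction bs with
  | nil => simp [innerA]
  | cons b bs ih =>
    rcases List.pairwise_cons.mp hbs with ⟨hble, htail⟩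
    by_cases heq : 4 * a * b + 3 * a + 3 * b = area
    · simp [innerA, heq]
    · by_cases hgt : 4 * a * b + 3 * a + 3 * b > area
      · have hall : bs.any (fun b => decide (4 * a * b + 3 * a + 3 * b = area)) = false := by
          rw [List.any_eq_false]
          intro b' hb'
          have hle := hble b' hb'
          simp only [decide_eq_true_eq]
          nlinarith
        simp [innerA, heq, hgt, hall]
      · simp [innerA, heq, hgt, ih htail]

theorem outerA_eq_any (area : Int) :
    ∀ as : List Int,
      outerA area as = as.any (fun a => innerA area a (PySem.List.pyRange 1 200 1)) := by
  intro as
  induction as with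
  | nil => rfl
  | cons a as ih =>
    by_cases h : innerA area a (PySem.List.pyRange 1 200 1) = true
    · simp [outerA, h]
    · simp only [Bool.not_eq_true] at h
      simp [outerA, h, ih]

-- For a ≥ 1: a solution b ∈ [1,199] of (4a+3)b = area-3a exists iff the
-- divisibility-and-range check of B succeeds.
theorem inner_any_eq_check (area a : Int) (ha : 1 ≤ a) :
    (PySem.List.pyRange 1 200 1).any (fun b => decide (4 * a * b + 3 * a + 3 * b = area)) =
    decide (PySem.Int.mod (area - 3 * a) (4 * a + 3) = 0 ∧
      1 ≤ PySem.Int.floordiv (area - 3 * a) (4 * a + 3) ∧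
      PySem.Int.floordiv (area - 3 * a) (4 * a + 3) ≤ 199) := by
  have hd : (0 : Int) < 4 * a + 3 := by omega
  rw [PySem.Int.mod_eq_emod_of_pos hd, PySem.Int.floordiv_eq_ediv_of_pos hd]
  set q := area - 3 * a with hq
  set d := 4 * a + 3 with hdd
  rw [Bool.eq_iff_iff]
  simp only [List.any_eq_true, decide_eq_true_eq, PySem.List.mem_pyRange_one]
  constructor
  · rintro ⟨b, ⟨hb1, hb2⟩, heq⟩
    have hqb : q = d * b := by rw [hq, hdd]; linarith
    have hdivq : q / d = b := by
      rw [hqb, Int.mul_ediv_cancel_left _ (by omega : d ≠ 0)]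
    have hm : q % d = 0 := by rw [hqb, Int.mul_emod_right]
    exact ⟨hm, by omega, by omega⟩
  · rintro ⟨hmod, h1, h2⟩
    refine ⟨q / d, ⟨h1, by omega⟩, ?_⟩
    have hqe : q = d * (q / d) := by
      have := Int.emod_add_mul_ediv q d
      omega
    have hexp : d * (q / d) = 4 * a * (q / d) + 3 * (q / d) := by rw [hdd]; ring
    omega

-- ===== VERDICT (by name: the statement is the Claim_ definition above) =====
theorem ExistArea_spec : Claim_equal_ExistArea := by
  intro area _
  unfold Spec_ExistArea ExistArea ExistArea_alt
  rw [outerA_eq_any]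
  apply pv_any_congr
  intro a hmem
  have ha : 1 ≤ a := (PySem.List.mem_pyRange_one.mp hmem).1
  rw [innerA_eq_any area a ha _ ((PySem.List.pairwise_lt_pyRange_one 1 200).imp (fun h => le_of_lt h))]
  exact inner_any_eq_check area a ha
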